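-- pv_equiv track=rewrite | github.com/suyoumo/OpenClawProBench | harness/live_harness.py | _should_normalize_terminated_exit
-- ===== SOURCE A (Python) =====
-- from typing import Any
--
-- def _should_normalize_terminated_exit(
--
--     status: str,
--     exit_code: int,
--     error_detail: str,
--     trace: dict[str, Any],
-- ) -> bool:
--     if status != "error" or exit_code != 1:
--         return False
--     if str(error_detail).strip().lower() != "terminated":
--         return False
--     events = trace.get("events", []) if isinstance(trace, dict) else []
--     if not any(event.get("type") == "assistant_message" and str(event.get("text", "")).strip() for event in events):
--         return False
--     return any(event.get("type") in {"assistant_message", "tool_call", "tool_result"} for event in events)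
-- ===== SOURCE B (Python) =====
-- from typing import Any
--
-- def _should_normalize_terminated_exit(
--     status: str,
--     exit_code: int,
--     error_detail: str,
--     trace: dict[str, Any],
-- ) -> bool:
--     # Same guards as A; the two any() passes are fused into one early-exiting
--     # loop that maintains both flags.
--     if status != "error" or exit_code != 1:
--         return False
--     if str(error_detail).strip().lower() != "terminated":
--         return False
--     events = trace.get("events", []) if isinstance(trace, dict) else []
--     has_message = False
--     has_activity = False
--     for event in events:
--         etype = event.get("type")
--         if etype == "assistant_message" and str(event.get("text", "")).strip():
--             has_message = True
--         if etype in ("assistant_message", "tool_call", "tool_result"):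
--             has_activity = True
--         if has_message and has_activity:
--             break
--     return has_message and has_activity
-- ===== Notes on version B (the rewrite author's own statement) =====
-- stated objective: alternative
-- what changed: The two separate any() scans over events are replaced by a single explicit loop maintaining two flags with an early break once both are set, returning their conjunction.
import Mathlib
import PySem

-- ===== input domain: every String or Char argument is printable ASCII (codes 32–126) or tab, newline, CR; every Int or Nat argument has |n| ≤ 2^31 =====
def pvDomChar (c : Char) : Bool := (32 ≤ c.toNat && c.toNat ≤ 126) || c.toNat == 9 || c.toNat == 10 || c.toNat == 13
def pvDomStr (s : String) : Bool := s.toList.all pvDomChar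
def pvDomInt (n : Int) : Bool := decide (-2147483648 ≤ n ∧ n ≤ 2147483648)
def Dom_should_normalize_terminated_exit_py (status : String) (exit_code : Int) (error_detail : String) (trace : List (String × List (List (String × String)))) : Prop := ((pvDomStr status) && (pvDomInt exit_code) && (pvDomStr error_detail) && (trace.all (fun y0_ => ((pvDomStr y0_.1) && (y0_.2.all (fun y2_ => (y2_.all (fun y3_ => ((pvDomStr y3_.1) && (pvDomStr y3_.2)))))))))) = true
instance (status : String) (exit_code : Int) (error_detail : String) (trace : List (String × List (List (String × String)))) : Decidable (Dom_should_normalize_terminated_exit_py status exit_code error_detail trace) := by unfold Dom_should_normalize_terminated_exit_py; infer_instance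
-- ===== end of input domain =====

-- ===== PORT A =====
-- B fuses A's two any() passes over events into one early-exiting flag loop; same return value.
def pvIsMsg (ev : List (String × String)) : Bool :=
  (ev.lookup "type" == some "assistant_message")
    && !(PySem.Str.strip ((ev.lookup "text").getD "") == "")

def pvIsActivity (ev : List (String × String)) : Bool :=
  let t := ev.lookup "type"
  t == some "assistant_message" || t == some "tool_call" || t == some "tool_result"

def should_normalize_terminated_exit_py (status : String) (exit_code : Int) (error_detail : String) (trace : List (String × List (List (String × String)))) : Bool :=
  if status != "error" || exit_code != 1 then false
  else if PySem.Str.lower (PySem.Str.strip error_detail) != "terminated" then false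
  else
    let events := (trace.lookup "events").getD []
    if !(events.any pvIsMsg) then false
    else events.any pvIsActivity

-- ===== PORT B =====
-- the fused loop of Source B: two flags, early break once both are set
def pvScanEvents : List (List (String × String)) → Bool → Bool → Bool
  | [], hasMsg, hasAct => hasMsg && hasAct
  | ev :: rest, hasMsg, hasAct =>
    let hasMsg' := hasMsg || pvIsMsg ev
    let hasAct' := hasAct || pvIsActivity ev
    if hasMsg' && hasAct' then true else pvScanEvents rest hasMsg' hasAct'

def should_normalize_terminated_exit_py_alt (status : String) (exit_code : Int) (error_detail : String) (trace : List (String × List (List (String × String)))) : Bool :=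
  if status != "error" || exit_code != 1 then false
  else if PySem.Str.lower (PySem.Str.strip error_detail) != "terminated" then false
  else pvScanEvents ((trace.lookup "events").getD []) false false

-- ===== PRECONDITION & SPEC =====
def Spec_should_normalize_terminated_exit_py (status : String) (exit_code : Int) (error_detail : String) (trace : List (String × List (List (String × String)))) (out : Bool) : Prop := out = should_normalize_terminated_exit_py_alt status exit_code error_detail trace
instance (status : String) (exit_code : Int) (error_detail : String) (trace : List (String × List (List (String × String)))) (out : Bool) : Decidable (Spec_should_normalize_terminated_exit_py status exit_code error_detail trace out) := by unfold Spec_should_normalize_terminated_exit_py; infer_instance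

-- ===== CLAIM (what is proved, stated in full; the proofs are below) =====
def Claim_equal_should_normalize_terminated_exit_py : Prop := ∀ (status : String) (exit_code : Int) (error_detail : String) (trace : List (String × List (List (String × String)))), Dom_should_normalize_terminated_exit_py status exit_code error_detail trace → Spec_should_normalize_terminated_exit_py status exit_code error_detail trace (should_normalize_terminated_exit_py status exit_code error_detail trace)

-- ===== LEMMAS AND PROOFS =====

-- the fused flag loop computes the conjunction of the two any-scans
theorem pvScanEvents_eq (evs : List (List (String × String))) :
    ∀ m a : Bool, pvScanEvents evs m a = ((m || evs.any pvIsMsg) && (a || evs.any pvIsActivity)) := by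
  induction evs with
  | nil => intro m a; simp [pvScanEvents]
  | cons ev rest ih =>
    intro m a
    simp only [pvScanEvents, List.any_cons]
    by_cases h : ((m || pvIsMsg ev) && (a || pvIsActivity ev)) = true
    · rw [if_pos h]
      rcases Bool.and_eq_true .. |>.mp h with ⟨h1, h2⟩
      rcases Bool.or_eq_true .. |>.mp h1 with h1' | h1' <;>
        rcases Bool.or_eq_true .. |>.mp h2 with h2' | h2' <;> simp [h1', h2']
    · rw [if_neg h, ih]
      simp [Bool.or_assoc]

-- ===== VERDICT (by name: the statement is the Claim_ definition above) =====
theorem should_normalize_terminated_exit_py_spec : Claim_equal_should_normalize_terminated_exit_py := by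
  intro status exit_code error_detail trace _
  unfold Spec_should_normalize_terminated_exit_py
  unfold should_normalize_terminated_exit_py should_normalize_terminated_exit_py_alt
  split
  · rfl
  split
  · rfl
  rw [pvScanEvents_eq]
  simp only [Bool.false_or]
  cases h1 : ((trace.lookup "events").getD []).any pvIsMsg
  · simp
  · simp
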